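-- pv_equiv track=rewrite | github.com/martynov1/crypto | 2_prng.py | fsum
-- ===== SOURCE A (Python) =====
-- def fsum(t, key, n):
--     """ Вычисляем суммы """
--     sum = []
--     res = ''
--     for q in range(len(t)):
--         for i, j in zip(key[q], t[q]):
--             if i == '0' and j == '0':
--                 res += '0'
--             elif i == '0' and j == '1':
--                 res += '1'
--             elif i == '1' and j == '0':
--                 res += '1'
--             else:
--                 res += '0'
--             if len(res) == n:
--                 sum.append(res)
--                 res = ''
--     return sum
-- ===== SOURCE B (Python) =====
-- def fsum(t, key, n):
--     """XOR all paired bit-strings into one flat string, then chunk it by slicing."""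
--     bits = ''.join('1' if {i, j} == {'0', '1'} else '0'
--                    for q in range(len(t)) for i, j in zip(key[q], t[q]))
--     if n <= 0:
--         return []
--     return [bits[q * n:(q + 1) * n] for q in range(len(bits) // n)]
-- ===== Notes on version B (the rewrite author's own statement) =====
-- stated objective: simpler
-- what changed: A threads a (chunks, partial-string) accumulator through a nested stateful loop, cutting a chunk each time the buffer length hits n; B first builds the whole XOR bit string in one join over the zipped pairs and then returns the length-n chunks by slicing (len(bits)//n slices), with no running state.
import Mathlib
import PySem

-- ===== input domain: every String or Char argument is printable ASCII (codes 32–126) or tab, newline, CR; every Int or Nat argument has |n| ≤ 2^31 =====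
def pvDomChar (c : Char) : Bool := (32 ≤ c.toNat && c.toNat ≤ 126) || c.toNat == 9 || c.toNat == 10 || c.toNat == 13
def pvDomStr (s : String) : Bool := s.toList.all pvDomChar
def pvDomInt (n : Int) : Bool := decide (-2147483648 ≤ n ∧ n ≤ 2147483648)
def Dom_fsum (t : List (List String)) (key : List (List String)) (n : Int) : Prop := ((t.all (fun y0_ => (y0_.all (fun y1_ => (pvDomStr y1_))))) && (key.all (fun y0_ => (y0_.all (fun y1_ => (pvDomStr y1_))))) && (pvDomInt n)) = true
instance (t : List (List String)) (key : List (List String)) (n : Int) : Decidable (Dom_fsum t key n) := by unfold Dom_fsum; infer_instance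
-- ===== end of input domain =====

-- B rebuilds fsum as: one flat XOR character string, then chunks of length n taken by slicing
-- (same return value; 'simpler' decomposition, no running accumulator/state machine).

-- ===== PORT A =====
-- the four-branch XOR of the inner loop: one character per zipped pair
def fsumXorChar (i j : String) : Char :=
  if i == "0" && j == "0" then '0'
  else if i == "0" && j == "1" then '1'
  else if i == "1" && j == "0" then '1'
  else '0'

-- body of the inner 'for i, j in zip(key[q], t[q])' loop; res is the List Char behind Python's str res
def fsumInner (n : Int) (st : List String × List Char) (p : String × String) : List String × List Char :=
  let res := st.2 ++ [fsumXorChar p.1 p.2]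
  if (res.length : Int) = n then (st.1 ++ [String.mk res], []) else (st.1, res)

def fsum (t : List (List String)) (key : List (List String)) (n : Int) : List String :=
  ((PySem.List.pyRange 0 (PySem.List.len t) 1).foldl
      (fun st q =>
        (List.zip (PySem.List.pyGetD key q []) (PySem.List.pyGetD t q [])).foldl (fsumInner n) st)
      (([] : List String), ([] : List Char))).1

-- ===== PORT B =====
-- '1' if {i, j} == {'0', '1'} else '0'
def fsumAltChar (i j : String) : Char :=
  if (i == "0" && j == "1") || (i == "1" && j == "0") then '1' else '0'

def fsum_alt (t : List (List String)) (key : List (List String)) (n : Int) : List String :=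
  let bits : List Char :=
    (PySem.List.pyRange 0 (PySem.List.len t) 1).flatMap
      (fun q => (List.zip (PySem.List.pyGetD key q []) (PySem.List.pyGetD t q [])).map
        (fun p => fsumAltChar p.1 p.2))
  if n ≤ 0 then []
  else
    (PySem.List.pyRange 0 (PySem.Int.floordiv (PySem.List.len bits) n) 1).map
      (fun q => String.mk (PySem.List.slice bits (some (q * n)) (some ((q + 1) * n))))

-- ===== PRECONDITION & SPEC =====
-- Pre_ excludes exactly the inputs where the Python A raises IndexError: key shorter than t
-- (A reads key[q] for every q < len(t)).  B raises there too.
def Pre_fsum (t : List (List String)) (key : List (List String)) (n : Int) : Prop :=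
  t.length ≤ key.length
instance (t : List (List String)) (key : List (List String)) (n : Int) : Decidable (Pre_fsum t key n) := by unfold Pre_fsum; infer_instance

def pvWitness_fsum : List (List String) × List (List String) × Int :=
  ([["1", "0", "1", "1"], ["0", "1"]], [["1", "1", "0", "1"], ["1", "1"]], 2)

def Spec_fsum (t : List (List String)) (key : List (List String)) (n : Int) (out : List String) : Prop := out = fsum_alt t key n
instance (t : List (List String)) (key : List (List String)) (n : Int) (out : List String) : Decidable (Spec_fsum t key n out) := by unfold Spec_fsum; infer_instance

-- ===== CLAIM (what is proved, stated in full; the proofs are below) =====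
def Claim_equal_fsum : Prop := ∀ (t : List (List String)) (key : List (List String)) (n : Int), Dom_fsum t key n → Pre_fsum t key n → Spec_fsum t key n (fsum t key n)

-- ===== LEMMAS AND PROOFS =====

-- the per-character step both sides reduce to
def chStep (n : Int) (st : List String × List Char) (c : Char) : List String × List Char :=
  let res := st.2 ++ [c]
  if (res.length : Int) = n then (st.1 ++ [String.mk res], []) else (st.1, res)

theorem fsumInner_eq_chStep (n : Int) (st : List String × List Char) (p : String × String) :
    fsumInner n st p = chStep n st (fsumXorChar p.1 p.2) := rfl

theorem chStep_keep (n : Int) (st : List String × List Char) (c : Char)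
    (h : ¬ (((st.2 ++ [c]).length : Int) = n)) : chStep n st c = (st.1, st.2 ++ [c]) := by
  rw [show chStep n st c = if (((st.2 ++ [c]).length : Int) = n)
      then (st.1 ++ [String.mk (st.2 ++ [c])], []) else (st.1, st.2 ++ [c]) from rfl, if_neg h]

theorem chStep_cut (n : Int) (st : List String × List Char) (c : Char)
    (h : ((st.2 ++ [c]).length : Int) = n) :
    chStep n st c = (st.1 ++ [String.mk (st.2 ++ [c])], []) := by
  rw [show chStep n st c = if (((st.2 ++ [c]).length : Int) = n)
      then (st.1 ++ [String.mk (st.2 ++ [c])], []) else (st.1, st.2 ++ [c]) from rfl, if_pos h]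

theorem xorChar_eq (i j : String) : fsumXorChar i j = fsumAltChar i j := by
  unfold fsumXorChar fsumAltChar
  by_cases h1 : i == "0" <;> by_cases h2 : j == "0" <;> by_cases h3 : j == "1" <;>
    by_cases h4 : i == "1" <;> simp_all

-- the flat XOR string B builds
def bitsOf (t : List (List String)) (key : List (List String)) : List Char :=
  (PySem.List.pyRange 0 (PySem.List.len t) 1).flatMap
    (fun q => (List.zip (PySem.List.pyGetD key q []) (PySem.List.pyGetD t q [])).map
      (fun p => fsumAltChar p.1 p.2))

-- A's double loop is the char-step fold over the flat bits
theorem fsum_eq_fold_bits (t : List (List String)) (key : List (List String)) (n : Int) :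
    fsum t key n = ((bitsOf t key).foldl (chStep n) ([], [])).1 := by
  unfold fsum bitsOf
  rw [List.flatMap, List.foldl_flatten, List.foldl_map]
  congr 1
  apply PySem.List.foldl_congr_mem
  intro acc q _
  rw [List.foldl_map]
  apply PySem.List.foldl_congr_mem
  intro acc' p _
  rw [fsumInner_eq_chStep, xorChar_eq]

-- exact-length chunks of a char list
def chunkExact (m : Nat) (cs : List Char) : List (List Char) :=
  if h : 0 < m ∧ m ≤ cs.length then cs.take m :: chunkExact m (cs.drop m) else []
  termination_by cs.length
  decreasing_by simp [List.length_drop]; omega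

-- n ≤ 0: the cut never fires
theorem fold_nonpos (n : Int) (hn : n ≤ 0) (cs : List Char) (sum : List String) (res : List Char) :
    cs.foldl (chStep n) (sum, res) = (sum, res ++ cs) := by
  induction cs generalizing res with
  | nil => simp
  | cons c cs ih =>
      rw [List.foldl_cons, chStep_keep n (sum, res) c
        (by simp only [List.length_append, List.length_cons, List.length_nil]; omega)]
      rw [ih]
      simp

-- fewer than n chars remain: no cut, they pile into res
theorem fold_fill (n : Int) (cs : List Char) (sum : List String) : ∀ (res : List Char),
    ((res.length + cs.length : Nat) : Int) < n →
    cs.foldl (chStep n) (sum, res) = (sum, res ++ cs) := by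
  induction cs with
  | nil => intro res _; simp
  | cons c cs ih =>
      intro res h
      simp only [List.length_cons] at h
      rw [List.foldl_cons, chStep_keep n (sum, res) c
        (by simp only [List.length_append, List.length_cons, List.length_nil]; push_cast at h ⊢; omega)]
      rw [ih (res ++ [c])
        (by simp only [List.length_append, List.length_cons, List.length_nil]; push_cast at h ⊢; omega)]
      simp

-- exactly n chars complete a chunk
theorem fold_cut (n : Int) (cs : List Char) (sum : List String) : ∀ (res : List Char),
    cs ≠ [] → ((res.length + cs.length : Nat) : Int) = n →
    cs.foldl (chStep n) (sum, res) = (sum ++ [String.mk (res ++ cs)], []) := by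
  induction cs with
  | nil => intro res hne _; exact absurd rfl hne
  | cons c cs ih =>
      intro res _ h
      simp only [List.length_cons] at h
      by_cases hcs : cs = []
      · subst hcs
        rw [List.foldl_cons, chStep_cut n (sum, res) c
          (by simp only [List.length_append, List.length_cons, List.length_nil] at h ⊢
              push_cast at h ⊢; omega)]
        simp
      · have hpos : 0 < cs.length := List.length_pos_iff.mpr hcs
        rw [List.foldl_cons, chStep_keep n (sum, res) c
          (by simp only [List.length_append, List.length_cons, List.length_nil]; push_cast at h ⊢; omega)]
        rw [ih (res ++ [c]) hcs
          (by simp only [List.length_append, List.length_cons, List.length_nil]; push_cast at h ⊢; omega)]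
        simp

-- the whole fold produces exactly the length-n chunks
theorem fold_chunks (n : Int) (hn : 1 ≤ n) (cs : List Char) (sum : List String) :
    (cs.foldl (chStep n) (sum, [])).1 = sum ++ (chunkExact n.toNat cs).map String.mk := by
  induction cs using chunkExact.induct n.toNat generalizing sum with
  | case1 cs h ih =>
      obtain ⟨hm0, hm⟩ := h
      rw [chunkExact, dif_pos ⟨hm0, hm⟩]
      have hlen : (cs.take n.toNat).length = n.toNat := by
        simp [List.length_take]; omega
      conv_lhs => rw [(List.take_append_drop n.toNat cs).symm]
      rw [List.foldl_append]
      rw [fold_cut n (cs.take n.toNat) sum []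
        (by rw [← List.length_pos_iff, hlen]; omega)
        (by simp [hlen]; omega)]
      simp only [List.nil_append]
      rw [ih]
      simp
  | case2 cs h =>
      rw [chunkExact, dif_neg h]
      rw [fold_fill n cs sum [] (by simp; omega)]
      simp

-- B's slice comprehension also produces exactly the length-n chunks
theorem slices_eq_chunks (m : Nat) (cs : List Char) :
    (List.range (cs.length / m)).map
        (fun (q : Nat) => PySem.List.slice cs (some ((q : Int) * m)) (some (((q : Int) + 1) * m)))
      = chunkExact m cs := by
  induction cs using chunkExact.induct m with
  | case1 cs h ih =>
      obtain ⟨hm0, hle⟩ := h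
      rw [chunkExact, dif_pos ⟨hm0, hle⟩]
      rw [Nat.div_eq_sub_div hm0 hle, List.range_succ_eq_map, List.map_cons, List.map_map]
      have hlen : (cs.drop m).length = cs.length - m := by simp
      rw [← hlen, ← ih]
      congr 1
      · -- head: slice cs [0, m) = take m
        have e0 : ((0 : Nat) : Int) * m = (((0 : Nat)) : Int) := by push_cast; ring
        have e1 : (((0 : Nat) : Int) + 1) * m = ((m : Nat) : Int) := by push_cast; ring
        rw [e0, e1, PySem.List.slice_natCast]
        simp
      · -- tail: shifting the slice window by m is dropping m chars
        apply List.map_congr_left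
        intro q _
        simp only [Function.comp_apply]
        have e1 : ((q.succ : Nat) : Int) * m = (((q + 1) * m : Nat) : Int) := by push_cast; ring
        have e2 : (((q.succ : Nat) : Int) + 1) * m = (((q + 2) * m : Nat) : Int) := by push_cast; ring
        have e3 : ((q : Nat) : Int) * m = ((q * m : Nat) : Int) := by push_cast; ring
        have e4 : (((q : Nat) : Int) + 1) * m = (((q + 1) * m : Nat) : Int) := by push_cast; ring
        rw [e1, e2, PySem.List.slice_natCast, e3, e4, PySem.List.slice_natCast]
        rw [List.drop_drop]
        have hqm1 : (q + 1) * m = q * m + m := by ring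
        have hqm2 : (q + 2) * m = q * m + m + m := by ring
        rw [hqm1, hqm2]
        congr 1
        · omega
        · congr 1; omega
  | case2 cs h =>
      rw [chunkExact, dif_neg h]
      have : cs.length / m = 0 := by
        rcases Nat.eq_zero_or_pos m with hm | hm
        · simp [hm]
        · exact Nat.div_eq_of_lt (by omega)
      rw [this]
      simp

-- ===== VERDICT (by name: the statement is the Claim_ definition above) =====
theorem fsum_spec : Claim_equal_fsum := by
  intro t key n _ _
  unfold Spec_fsum
  rw [fsum_eq_fold_bits]
  show _ = fsum_alt t key n
  unfold fsum_alt
  rw [show ((PySem.List.pyRange 0 (PySem.List.len t) 1).flatMap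
      (fun q => (List.zip (PySem.List.pyGetD key q []) (PySem.List.pyGetD t q [])).map
        (fun p => fsumAltChar p.1 p.2))) = bitsOf t key from rfl]
  by_cases hn : n ≤ 0
  · rw [if_pos hn, fold_nonpos n hn]
  · rw [if_neg hn]
    have hn1 : 1 ≤ n := by omega
    rw [fold_chunks n hn1, List.nil_append]
    have hfd : PySem.Int.floordiv (PySem.List.len (bitsOf t key)) n
        = (((bitsOf t key).length / n.toNat : Nat) : Int) := by
      rw [PySem.List.len_eq]
      conv_lhs => rw [show (n : Int) = ((n.toNat : Nat) : Int) by omega]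
      exact PySem.Int.floordiv_natCast _ _
    rw [hfd, PySem.List.pyRange_one, sub_zero, Int.toNat_natCast, List.map_map,
        ← slices_eq_chunks n.toNat (bitsOf t key), List.map_map]
    apply List.map_congr_left
    intro q _
    simp only [Function.comp_apply, zero_add]
    rw [show ((n.toNat : Nat) : Int) = n by omega]
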